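-- pv_equiv track=rewrite | github.com/Evaaaaaaaaaaa/VideoActionPrediction | gtea_dataset/model2.py | find_max_action_length
-- ===== SOURCE A (Python) =====
-- import copy
--
-- def find_max_action_length(data_dict):
--     # to minimize input size, convert frames to actions first
--     temp_dict = copy.deepcopy(data_dict)
--     temp_dict = frames_to_action(temp_dict)
--     max_action_len = 0
--     for filename, action in temp_dict.items():
--         if len(action) > max_action_len:
--             max_action_len = len(action)
--     return max_action_len
--
-- def frames_to_action(input_dict):
--
--     for filename, frames in input_dict.items():
--         action_list = []
--         for frame in frames:
--             if len(action_list) == 0: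
--                 action_list.append(frame)
--             else:
--                 if frame != action_list[-1]:
--                     action_list.append(frame)
--         input_dict[filename] = action_list
--     return input_dict
-- ===== SOURCE B (Python) =====
-- def find_max_action_length(data_dict):
--     # segment count = len(frames) - number of equal adjacent pairs; no collapsed
--     # lists, no deepcopy, no run-tracking state
--     best = 0
--     for frames in data_dict.values():
--         if frames:
--             segs = len(frames) - sum(a == b for a, b in zip(frames, frames[1:]))
--             if segs > best:
--                 best = segs
--     return best
-- ===== Notes on version B (the rewrite author's own statement) =====
-- stated objective: simpler
-- what changed: Instead of deepcopying the dict, materialising a collapsed action list per file and rescanning for the longest, B computes each file's segment count arithmetically as len(frames) minus the number of equal adjacent pairs (a pairwise zip), keeping a running max.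
import Mathlib
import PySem

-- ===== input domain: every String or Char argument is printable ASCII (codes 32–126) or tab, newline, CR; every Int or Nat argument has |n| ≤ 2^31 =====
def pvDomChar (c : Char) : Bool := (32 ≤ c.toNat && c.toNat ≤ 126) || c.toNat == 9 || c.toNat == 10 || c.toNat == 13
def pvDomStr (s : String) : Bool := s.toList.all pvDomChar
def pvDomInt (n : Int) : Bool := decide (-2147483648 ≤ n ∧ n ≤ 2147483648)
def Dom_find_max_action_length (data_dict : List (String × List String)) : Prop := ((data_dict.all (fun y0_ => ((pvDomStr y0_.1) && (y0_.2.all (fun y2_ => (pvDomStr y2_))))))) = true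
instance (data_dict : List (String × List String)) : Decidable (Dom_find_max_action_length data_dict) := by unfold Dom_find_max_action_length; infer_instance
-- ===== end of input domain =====

-- B replaces A's deepcopy + collapsed-list materialisation + rescan by one running-max
-- loop where each file's segment count is len(frames) minus the count of equal adjacent
-- pairs; objective: simpler, same asymptotic cost.


-- ===== PORT A =====
-- frames_to_action's inner loop on one file's frame list: append frame unless it
-- equals action_list[-1] (the last element, read via getLast? on the nonempty list).
def pvCollapseA (frames : List String) : List String :=
  frames.foldl
    (fun action_list frame =>
      if action_list = [] then action_list ++ [frame]
      else if some frame ≠ action_list.getLast? then action_list ++ [frame]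
      else action_list)
    []

-- A: deepcopy (pure values here), transform every entry with frames_to_action,
-- then scan the transformed dict for the largest len(action).
def find_max_action_length (data_dict : List (String × List String)) : Int :=
  (data_dict.map (fun p => (p.1, pvCollapseA p.2))).foldl
    (fun max_action_len p =>
      if ((p.2.length : Int)) > max_action_len then (p.2.length : Int) else max_action_len)
    0

-- ===== PORT B =====
-- B: one loop, best-so-far accumulator; per nonempty frame list,
-- segs = len(frames) - sum(a == b for a, b in zip(frames, frames[1:])).
def find_max_action_length_alt (data_dict : List (String × List String)) : Int :=
  data_dict.foldl
    (fun best p =>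
      if p.2.length ≠ 0 then
        let segs : Int :=
          (p.2.length : Int) - (((p.2.zip p.2.tail).countP (fun q => q.1 == q.2)) : Int)
        if segs > best then segs else best
      else best)
    0

-- ===== PRECONDITION & SPEC =====
def Spec_find_max_action_length (data_dict : List (String × List String)) (out : Int) : Prop := out = find_max_action_length_alt data_dict
instance (data_dict : List (String × List String)) (out : Int) : Decidable (Spec_find_max_action_length data_dict out) := by unfold Spec_find_max_action_length; infer_instance

-- ===== CLAIM (what is proved, stated in full; the proofs are below) =====
def Claim_equal_find_max_action_length : Prop := ∀ (data_dict : List (String × List String)), Dom_find_max_action_length data_dict → Spec_find_max_action_length data_dict (find_max_action_length data_dict)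

-- ===== LEMMAS AND PROOFS =====

-- continuation segment count: number of positions whose frame differs from the
-- previous one (previous = l at the start)
def pvSegFrom : Option String → List String → Int
  | _, [] => 0
  | l, f :: t => if some f = l then pvSegFrom l t else 1 + pvSegFrom (some f) t

theorem pvCollapse_len (fs : List String) (acc : List String) :
    (((fs.foldl
      (fun action_list frame =>
        if action_list = [] then action_list ++ [frame]
        else if some frame ≠ action_list.getLast? then action_list ++ [frame]
        else action_list)
      acc).length : Int))
    = (acc.length : Int) + pvSegFrom acc.getLast? fs := by
  induction fs generalizing acc with
  | nil => simp [pvSegFrom]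
  | cons f t ih =>
    simp only [List.foldl_cons]
    by_cases h0 : acc = []
    · subst h0
      simpa [pvSegFrom] using ih [f]
    · by_cases hl : acc.getLast? = some f
      · simp only [if_neg h0, hl, ne_eq, not_true_eq_false, if_false]
        rw [ih acc, hl]
        simp [pvSegFrom]
      · have hne : some f ≠ acc.getLast? := fun h => hl h.symm
        simp only [if_neg h0, if_pos hne]
        rw [ih (acc ++ [f])]
        simp only [pvSegFrom, if_neg hne, List.getLast?_concat, List.length_append,
          List.length_singleton]
        push_cast
        ring

theorem pvSegFrom_some (t : List String) (x : String) :
    pvSegFrom (some x) t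
      = (t.length : Int) - ((((x :: t).zip t).countP (fun q => q.1 == q.2)) : Int) := by
  induction t generalizing x with
  | nil => simp [pvSegFrom]
  | cons y r ih =>
    by_cases h : y = x
    · subst h
      simp only [pvSegFrom, if_pos rfl]
      rw [ih y]
      simp only [List.zip_cons_cons, List.countP_cons, beq_self_eq_true,
        List.length_cons]
      push_cast
      ring
    · have hne : some y ≠ some x := by simpa using h
      have h' : ¬ ((x == y) = true) := by
        intro hh
        exact h ((beq_iff_eq.mp hh).symm)
      simp only [pvSegFrom, if_neg hne]
      rw [ih y]
      simp only [List.zip_cons_cons, List.countP_cons, List.length_cons]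
      rw [if_neg h']
      push_cast
      ring

theorem pvSegFrom_none (fs : List String) :
    pvSegFrom none fs
      = (fs.length : Int) - (((fs.zip fs.tail).countP (fun q => q.1 == q.2)) : Int) := by
  cases fs with
  | nil => simp [pvSegFrom]
  | cons f t =>
    simp only [pvSegFrom, reduceCtorEq, if_false, List.tail_cons]
    rw [pvSegFrom_some]
    push_cast [List.length_cons]
    ring

theorem fold_eq (l : List (String × List String)) (b : Int) (hb : 0 ≤ b) :
    (l.map (fun p => (p.1, pvCollapseA p.2))).foldl
      (fun max_action_len p =>
        if ((p.2.length : Int)) > max_action_len then (p.2.length : Int) else max_action_len)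
      b
    = l.foldl
        (fun best p =>
          if p.2.length ≠ 0 then
            let segs : Int :=
              (p.2.length : Int) - (((p.2.zip p.2.tail).countP (fun q => q.1 == q.2)) : Int)
            if segs > best then segs else best
          else best)
        b := by
  induction l generalizing b with
  | nil => rfl
  | cons p t ih =>
    simp only [List.map_cons, List.foldl_cons]
    have hlen : ((pvCollapseA p.2).length : Int)
        = (p.2.length : Int) - (((p.2.zip p.2.tail).countP (fun q => q.1 == q.2)) : Int) := by
      have := pvCollapse_len p.2 []
      simpa [pvCollapseA, pvSegFrom_none] using this
    by_cases hnil : p.2.length = 0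
    · have hp : p.2 = [] := List.length_eq_zero_iff.mp hnil
      have hc : pvCollapseA p.2 = [] := by rw [hp]; rfl
      rw [hc]
      simp only [hnil, ne_eq, not_true_eq_false, if_false, List.length_nil,
        Nat.cast_zero, gt_iff_lt]
      rw [if_neg (by omega)]
      exact ih b hb
    · simp only [hnil, ne_eq, not_false_eq_true, if_true]
      rw [hlen]
      set segs : Int :=
        (p.2.length : Int) - (((p.2.zip p.2.tail).countP (fun q => q.1 == q.2)) : Int) with hs
      by_cases hgt : segs > b
      · rw [if_pos hgt]
        have hsegs : 0 ≤ segs := le_trans hb (le_of_lt hgt)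
        exact ih segs hsegs
      · rw [if_neg hgt]
        exact ih b hb

-- ===== VERDICT (by name: the statement is the Claim_ definition above) =====
theorem find_max_action_length_spec : Claim_equal_find_max_action_length := by
  intro data_dict _
  unfold Spec_find_max_action_length find_max_action_length find_max_action_length_alt
  exact fold_eq data_dict 0 le_rfl
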